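-- pv_equiv track=rewrite | github.com/janjegit/pyalgorithm | blablub.py | blub_iter
-- ===== SOURCE A (Python) =====
-- def stack():
--     return ()
--
-- def empty_stack(s):
--     return s==()
--
-- def push(v,s):
--     return (v,s)
--
-- def pop(s):
--     return stack() if empty_stack(s) else s[1]
--
-- def top(s):
--     return None if empty_stack(s) else s[0]
--
-- def blub_iter(n,r):
--     st = stack()
--     rt = stack()
--     st = push(('blub',n,r),st)
--     while not empty_stack(st):
--         nxt = top(st)
--         st = pop(st)
--         fun = nxt[0]
--         if fun=='blub':
--             n = nxt[1]
--             r = nxt[2]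
--             if n==0:
--                 rt = push(r,rt)
--             else:
--                 rt = push(1,rt)
--                 st = push(('+',),st)
--                 st = push(('blub',n-1,r),st)
--         elif fun=='+':
--             s0 = top(rt)
--             rt = pop(rt)
--             s1 = top(rt)
--             rt = pop(rt)
--             rt = push(s0+s1,rt)
--     return top(rt)
-- ===== SOURCE B (Python) =====
-- def blub_iter(n, r):
--     return r + n
-- ===== Notes on version B (the rewrite author's own statement) =====
-- stated objective: faster
-- what changed: Replaced the explicit two-stack continuation machine that unwinds n into n pushed 1s and n additions by the closed form r + n.
import Mathlib
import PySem

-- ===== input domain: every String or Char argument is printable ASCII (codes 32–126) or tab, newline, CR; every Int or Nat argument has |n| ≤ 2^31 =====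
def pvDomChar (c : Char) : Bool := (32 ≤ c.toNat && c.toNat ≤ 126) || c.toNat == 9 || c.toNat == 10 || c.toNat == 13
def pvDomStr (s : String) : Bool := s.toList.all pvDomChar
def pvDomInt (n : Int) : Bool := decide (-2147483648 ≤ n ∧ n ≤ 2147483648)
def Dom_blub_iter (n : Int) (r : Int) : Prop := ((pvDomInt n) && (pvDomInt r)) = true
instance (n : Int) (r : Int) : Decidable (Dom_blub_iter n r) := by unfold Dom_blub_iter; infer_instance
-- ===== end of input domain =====

-- B replaces A's two-stack continuation machine (O(n) loop) by the closed form r + n (O(1)).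

-- ===== PORT A =====
-- A's stack frames: ('blub', n, r) and ('+',)
inductive PvInstr : Type
  | blub : Int → Int → PvInstr
  | plus : PvInstr
deriving DecidableEq, Repr

-- The while-loop of A, transliterated step for step; `fuel` only makes the loop total
-- (2*n+2 steps always suffice when n ≥ 0; for n < 0 the Python loop never terminates).
-- `none` = the loop would crash (top(rt) is None in a '+' frame) or fuel ran out; never reached under Pre_.
def pvRun : Nat → List PvInstr → List Int → Option Int
  | _, [], rt => rt.head?                         -- loop exit: return top(rt)
  | 0, _ :: _, _ => none
  | fuel + 1, PvInstr.blub n r :: st, rt =>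
      if n = 0 then pvRun fuel st (r :: rt)
      else pvRun fuel (PvInstr.blub (n - 1) r :: PvInstr.plus :: st) (1 :: rt)
  | fuel + 1, PvInstr.plus :: st, rt =>
      match rt with
      | s0 :: s1 :: rest => pvRun fuel st ((s0 + s1) :: rest)
      | _ => none

def blub_iter (n : Int) (r : Int) : Int :=
  (pvRun (2 * n.toNat + 2) [PvInstr.blub n r] []).getD 0

-- ===== PORT B =====
def blub_iter_alt (n : Int) (r : Int) : Int := r + n

-- ===== PRECONDITION & SPEC =====
-- Pre_ excludes n < 0: there A's while loop decrements n forever and never returns.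
def Pre_blub_iter (n : Int) (r : Int) : Prop := 0 ≤ n
instance (n : Int) (r : Int) : Decidable (Pre_blub_iter n r) := by unfold Pre_blub_iter; infer_instance
def pvWitness_blub_iter : Int × Int := (3, 5)

def Spec_blub_iter (n : Int) (r : Int) (out : Int) : Prop := out = blub_iter_alt n r
instance (n : Int) (r : Int) (out : Int) : Decidable (Spec_blub_iter n r out) := by unfold Spec_blub_iter; infer_instance

-- ===== CLAIM (what is proved, stated in full; the proofs are below) =====
def Claim_equal_blub_iter : Prop := ∀ (n : Int) (r : Int), Dom_blub_iter n r → Pre_blub_iter n r → Spec_blub_iter n r (blub_iter n r)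

-- ===== LEMMAS AND PROOFS =====

-- Processing one 'blub k r' frame with enough fuel consumes 2k+1 steps and pushes r+k onto rt.
theorem pvRun_blub (k : Nat) : ∀ (fuel : Nat), 2 * k + 1 ≤ fuel →
    ∀ (r : Int) (st : List PvInstr) (rt : List Int),
      pvRun fuel (PvInstr.blub (k : Int) r :: st) rt
        = pvRun (fuel - (2 * k + 1)) st ((r + (k : Int)) :: rt) := by
  induction k with
  | zero =>
    intro fuel hf r st rt
    obtain ⟨f, rfl⟩ : ∃ f, fuel = f + 1 := ⟨fuel - 1, by omega⟩
    simp [pvRun]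
  | succ k ih =>
    intro fuel hf r st rt
    obtain ⟨f, rfl⟩ : ∃ f, fuel = f + 1 := ⟨fuel - 1, by omega⟩
    have hne : ((k : Int) + 1) ≠ 0 := by omega
    have hsub : ((k : Int) + 1) - 1 = (k : Int) := by ring
    simp only [pvRun, Nat.cast_succ, hne, if_false, hsub]
    rw [ih f (by omega)]
    obtain ⟨g, hg⟩ : ∃ g, f - (2 * k + 1) = g + 1 := ⟨f - (2 * k + 1) - 1, by omega⟩
    rw [hg]
    simp only [pvRun]
    have : f + 1 - (2 * (k + 1) + 1) = g := by omega
    rw [this]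
    congr 1
    push_cast
    ring

-- ===== VERDICT (by name: the statement is the Claim_ definition above) =====
theorem blub_iter_spec : Claim_equal_blub_iter := by
  intro n r _ hn
  unfold Spec_blub_iter blub_iter blub_iter_alt
  have hcast : ((n.toNat : Int)) = n := Int.toNat_of_nonneg hn
  rw [show (PvInstr.blub n r) = PvInstr.blub ((n.toNat : Int)) r by rw [hcast]]
  rw [pvRun_blub n.toNat (2 * n.toNat + 2) (by omega)]
  simp [pvRun, hcast]
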